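-- pv_equiv track=rewrite | github.com/jro44/777 | 777v2.py | has_run_length
-- ===== SOURCE A (Python) =====
-- from typing import List, Dict, Tuple, Optional
--
-- def has_run_length(nums_sorted: List[int], run_len: int) -> bool:
--     if run_len <= 1:
--         return True
--     run = 1
--     for a, b in zip(nums_sorted, nums_sorted[1:]):
--         if b == a + 1:
--             run += 1
--             if run >= run_len:
--                 return True
--         else:
--             run = 1
--     return False
-- ===== SOURCE B (Python) =====
-- def has_run_length(nums_sorted, run_len):
--     if run_len <= 1:
--         return True
--     n = len(nums_sorted)
--     return any(all(nums_sorted[i + k] == nums_sorted[i] + k for k in range(1, run_len))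
--                for i in range(n - run_len + 1))
-- ===== Notes on version B (the rewrite author's own statement) =====
-- stated objective: idiomatic
-- what changed: B replaces A's stateful run-counter loop with early return by a declarative any/all window check: it returns True iff some index i starts a window where nums[i+k] == nums[i]+k for all k in range(1, run_len).
import Mathlib
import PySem

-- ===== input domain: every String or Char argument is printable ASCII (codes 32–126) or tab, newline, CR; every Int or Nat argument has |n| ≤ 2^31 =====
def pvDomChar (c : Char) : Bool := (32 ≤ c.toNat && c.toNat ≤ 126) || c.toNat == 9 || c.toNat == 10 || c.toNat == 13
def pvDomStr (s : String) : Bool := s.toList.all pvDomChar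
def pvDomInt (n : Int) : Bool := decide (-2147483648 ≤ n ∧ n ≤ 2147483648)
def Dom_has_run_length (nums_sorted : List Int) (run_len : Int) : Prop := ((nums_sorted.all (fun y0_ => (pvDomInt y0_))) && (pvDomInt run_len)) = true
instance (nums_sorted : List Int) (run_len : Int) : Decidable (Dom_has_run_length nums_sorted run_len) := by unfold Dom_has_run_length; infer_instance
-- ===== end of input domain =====

-- B replaces A's stateful run-counter loop (early return) by a declarative any/all window check; objective: idiomatic.

-- ===== PORT A =====
-- the 'for a, b in zip(...)' loop with the 'run' accumulator and early return
def hasRunLoop (run_len : Int) (run : Int) : List (Int × Int) → Bool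
  | [] => false
  | (a, b) :: rest =>
    if b = a + 1 then
      if run + 1 ≥ run_len then true else hasRunLoop run_len (run + 1) rest
    else hasRunLoop run_len 1 rest

def has_run_length (nums_sorted : List Int) (run_len : Int) : Bool :=
  if run_len ≤ 1 then true
  else hasRunLoop run_len 1 (nums_sorted.zip (PySem.List.slice nums_sorted (some 1) none))

-- ===== PORT B =====
-- any(all(nums[i+k] == nums[i] + k for k in range(1, run_len)) for i in range(n - run_len + 1));
-- every index i+k lies in range (i ≤ n-run_len, 1 ≤ k ≤ run_len-1), so pyGetD with default 0 is exact here.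
def has_run_length_alt (nums_sorted : List Int) (run_len : Int) : Bool :=
  if run_len ≤ 1 then true
  else
    let n : Int := nums_sorted.length
    (PySem.List.pyRange 0 (n - run_len + 1) 1).any (fun i =>
      (PySem.List.pyRange 1 run_len 1).all (fun k =>
        PySem.List.pyGetD nums_sorted (i + k) 0 == PySem.List.pyGetD nums_sorted i 0 + k))

-- ===== PRECONDITION & SPEC =====
def Spec_has_run_length (nums_sorted : List Int) (run_len : Int) (out : Bool) : Prop := out = has_run_length_alt nums_sorted run_len
instance (nums_sorted : List Int) (run_len : Int) (out : Bool) : Decidable (Spec_has_run_length nums_sorted run_len out) := by unfold Spec_has_run_length; infer_instance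

-- ===== CLAIM (what is proved, stated in full; the proofs are below) =====
def Claim_equal_has_run_length : Prop := ∀ (nums_sorted : List Int) (run_len : Int), Dom_has_run_length nums_sorted run_len → Spec_has_run_length nums_sorted run_len (has_run_length nums_sorted run_len)

-- ===== LEMMAS AND PROOFS =====

def okPair (ab : Int × Int) : Bool := ab.2 == ab.1 + 1

def onesLen (p : List (Int × Int)) : ℕ := (p.takeWhile okPair).length

-- a window of m consecutive +1-pairs exists in p
def GoodP (m : ℕ) (p : List (Int × Int)) : Prop :=
  ∃ j : ℕ, j + m ≤ p.length ∧ ∀ t < m, okPair (p.getD (j + t) (0, 0)) = true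

-- s-form: arithmetic-progression form matching B's window check
def GoodS (m : ℕ) (ns : List Int) : Prop :=
  ∃ j : ℕ, j + m < ns.length ∧ ∀ s : ℕ, 1 ≤ s → s ≤ m → ns.getD (j + s) 0 = ns.getD j 0 + s

theorem ones_iff (m : ℕ) (p : List (Int × Int)) :
    m ≤ onesLen p ↔ m ≤ p.length ∧ ∀ t < m, okPair (p.getD t (0, 0)) = true := by
  induction p generalizing m with
  | nil =>
    simp [onesLen]
    intro hm; omega
  | cons d rest ih =>
    cases m with
    | zero => simp
    | succ m' =>
      by_cases hd : okPair d = true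
      · have : onesLen (d :: rest) = onesLen rest + 1 := by
          simp [onesLen, List.takeWhile_cons, hd]
        rw [this]
        constructor
        · rintro h
          have := (ih m').mp (by omega)
          refine ⟨by simp; omega, ?_⟩
          intro t ht
          cases t with
          | zero => simpa using hd
          | succ t' => simpa using this.2 t' (by omega)
        · rintro ⟨hlen, hall⟩
          have : m' ≤ onesLen rest := by
            refine (ih m').mpr ⟨by simp at hlen; omega, ?_⟩
            intro t ht
            simpa using hall (t+1) (by omega)
          omega
      · have : onesLen (d :: rest) = 0 := by
          simp [onesLen, List.takeWhile_cons, hd]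
        rw [this]
        constructor
        · omega
        · rintro ⟨_, hall⟩
          exact absurd (by simpa using hall 0 (by omega)) hd

theorem goodP_cons (m : ℕ) (hm : 1 ≤ m) (d : Int × Int) (rest : List (Int × Int)) :
    GoodP m (d :: rest) ↔
      (m ≤ (d :: rest).length ∧ ∀ t < m, okPair ((d :: rest).getD t (0, 0)) = true) ∨
        GoodP m rest := by
  constructor
  · rintro ⟨j, hlen, hall⟩
    cases j with
    | zero => exact Or.inl ⟨by simpa using hlen, by simpa using hall⟩
    | succ j' =>
      refine Or.inr ⟨j', by simp at hlen; omega, ?_⟩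
      intro t ht
      have := hall t ht
      simpa [Nat.succ_add] using this
  · rintro (⟨hlen, hall⟩ | ⟨j, hlen, hall⟩)
    · exact ⟨0, by simpa using hlen, by simpa using hall⟩
    · refine ⟨j + 1, by simp; omega, ?_⟩
      intro t ht
      simpa [Nat.succ_add] using hall t ht

theorem loop_iff (r : Int) (hr : 2 ≤ r) (p : List (Int × Int)) (c : Int) (hc1 : 1 ≤ c)
    (hcr : c < r) :
    (hasRunLoop r c p = true ↔ r ≤ c + onesLen p ∨ GoodP (r - 1).toNat p) := by
  have hm : 1 ≤ (r - 1).toNat := by omega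
  have hmr : ((r - 1).toNat : Int) = r - 1 := by omega
  induction p generalizing c with
  | nil =>
    simp only [hasRunLoop]
    constructor
    · simp
    · rintro (h | ⟨j, hlen, _⟩)
      · simp [onesLen] at h; omega
      · simp at hlen; omega
  | cons d rest ih =>
    obtain ⟨a, b⟩ := d
    by_cases hd : b = a + 1
    · have hok : okPair (a, b) = true := by simp [okPair, hd]
      have hlen1 : onesLen ((a, b) :: rest) = onesLen rest + 1 := by
        simp [onesLen, hok]
      by_cases hret : c + 1 ≥ r
      · have : hasRunLoop r c ((a, b) :: rest) = true := by
          simp [hasRunLoop, hd, hret]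
        rw [this]
        simp only [true_iff]
        left; omega
      · have hstep : hasRunLoop r c ((a, b) :: rest) = hasRunLoop r (c + 1) rest := by
          simp [hasRunLoop, hd, hret]
        have H := ih (c + 1) (by omega) (by omega)
        rw [hstep]
        simp only [H]
        rw [goodP_cons _ hm, hlen1]
        constructor
        · rintro (h | h)
          · left; omega
          · right; right; exact h
        · rintro (h | (⟨hl, hall⟩ | h))
          · left; omega
          · -- prefix window of length m: onesLen ≥ m, so r ≤ 1 + onesLen ≤ c + onesLen
            have : (r - 1).toNat ≤ onesLen ((a, b) :: rest) :=
              (ones_iff _ _).mpr ⟨hl, hall⟩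
            rw [hlen1] at this
            left; omega
          · right; exact h
    · have hok : okPair (a, b) = false := by simp [okPair, hd]
      have hlen0 : onesLen ((a, b) :: rest) = 0 := by
        simp [onesLen, hok]
      have hstep : hasRunLoop r c ((a, b) :: rest) = hasRunLoop r 1 rest := by
        simp [hasRunLoop, hd]
      have H := ih 1 le_rfl (by omega)
      rw [hstep]
      simp only [H]
      rw [goodP_cons _ hm, hlen0]
      constructor
      · rintro (h | h)
        · -- r ≤ 1 + onesLen rest → prefix window in rest → GoodP rest
          right; right
          have hle : (r - 1).toNat ≤ onesLen rest := by omega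
          obtain ⟨hl, hall⟩ := (ones_iff _ _).mp hle
          exact ⟨0, by simpa using hl, by simpa using hall⟩
        · right; right; exact h
      · rintro (h | (⟨hl, hall⟩ | h))
        · omega
        · have := hall 0 (by omega)
          simp [hok] at this
        · right; exact h

theorem A_iff (ns : List Int) (r : Int) (hr : 2 ≤ r) :
    (has_run_length ns r = true ↔ GoodP (r - 1).toNat (ns.zip ns.tail)) := by
  have h1 : has_run_length ns r = hasRunLoop r 1 (ns.zip ns.tail) := by
    simp [has_run_length, PySem.List.slice_from_one, show ¬ r ≤ 1 by omega]
  rw [h1, loop_iff r hr _ 1 le_rfl (by omega)]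
  constructor
  · rintro (h | h)
    · obtain ⟨hl, hall⟩ := (ones_iff _ _).mp (show (r-1).toNat ≤ onesLen (ns.zip ns.tail) by omega)
      exact ⟨0, by simpa using hl, by simpa using hall⟩
    · exact h
  · exact fun h => Or.inr h

theorem B_iff (ns : List Int) (r : Int) (hr : 2 ≤ r) :
    (has_run_length_alt ns r = true ↔ GoodS (r - 1).toNat ns) := by
  have h0 : ¬ r ≤ 1 := by omega
  simp only [has_run_length_alt, if_neg h0, List.any_eq_true, List.all_eq_true,
    PySem.List.mem_pyRange_one, beq_iff_eq]
  constructor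
  · rintro ⟨i, ⟨hi0, hi1⟩, hall⟩
    obtain ⟨j, rfl⟩ : ∃ j : ℕ, i = (j : Int) := ⟨i.toNat, by omega⟩
    refine ⟨j, by omega, ?_⟩
    intro s hs1 hsm
    have hk := hall ((s : Int)) ⟨by omega, by omega⟩
    have e1 : (j : Int) + (s : Int) = ((j + s : ℕ) : Int) := by push_cast; ring
    rw [e1, PySem.List.pyGetD_natCast, PySem.List.pyGetD_natCast] at hk
    omega
  · rintro ⟨j, hj, hall⟩
    refine ⟨(j : Int), ⟨by omega, by omega⟩, ?_⟩
    intro k ⟨hk1, hk2⟩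
    have e1 : (j : Int) + k = ((j + k.toNat : ℕ) : Int) := by omega
    rw [e1, PySem.List.pyGetD_natCast, PySem.List.pyGetD_natCast]
    have := hall k.toNat (by omega) (by omega)
    simp only [List.getD_eq_getD_getElem?] at this ⊢
    rw [this]; omega

theorem bridge (ns : List Int) (m : ℕ) (hm : 1 ≤ m) :
    GoodP m (ns.zip ns.tail) ↔ GoodS m ns := by
  have hlen : (ns.zip ns.tail).length = ns.length - 1 := by
    simp [List.length_zip, List.length_tail]
  -- entry of the zip: pair (ns[u], ns[u+1])
  have hpair : ∀ u : ℕ, u < ns.length - 1 →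
      ((ns.zip ns.tail).getD u (0,0)) = (ns.getD u 0, ns.getD (u+1) 0) := by
    intro u hu
    have h1 : u < (ns.zip ns.tail).length := by omega
    have h2 : u < ns.length := by omega
    have h3 : u < ns.tail.length := by simp [List.length_tail]; omega
    rw [List.getD_eq_getElem _ _ h1, List.getElem_zip,
      List.getD_eq_getElem _ _ h2, List.getD_eq_getElem _ _ (by omega : u + 1 < ns.length)]
    congr 1
    rw [List.getElem_tail]
  constructor
  · rintro ⟨j, hjl, hall⟩
    rw [hlen] at hjl
    -- consecutive +1 steps give the arithmetic progression by induction on s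
    have step : ∀ t, t < m → ns.getD (j+t+1) 0 = ns.getD (j+t) 0 + 1 := by
      intro t ht
      have := hall t ht
      rw [hpair (j+t) (by omega)] at this
      simpa [okPair] using this
    refine ⟨j, by omega, ?_⟩
    intro s hs1 hsm
    clear hs1
    induction s with
    | zero => simp
    | succ s' ih =>
      have e : j + (s' + 1) = j + s' + 1 := by omega
      rw [e, step s' (by omega), ih (by omega)]
      push_cast; ring
  · rintro ⟨j, hjl, hall⟩
    refine ⟨j, by omega, ?_⟩
    intro t ht
    rw [hpair (j+t) (by omega)]
    simp only [okPair, beq_iff_eq]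
    have h1 : ns.getD (j+t) 0 = ns.getD j 0 + t := by
      cases Nat.eq_zero_or_pos t with
      | inl h => simp [h]
      | inr h => have := hall t h (by omega); rw [this]
    have h2 : ns.getD (j+t+1) 0 = ns.getD j 0 + (t+1) := by
      have e : j + t + 1 = j + (t+1) := by omega
      rw [e, hall (t+1) (by omega) (by omega)]; push_cast; ring
    rw [h1, h2]
    push_cast; ring


-- ===== VERDICT (by name: the statement is the Claim_ definition above) =====
theorem has_run_length_spec : Claim_equal_has_run_length := by
  intro ns r _
  unfold Spec_has_run_length
  by_cases hr : r ≤ 1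
  · simp [has_run_length, has_run_length_alt, hr]
  · have hr2 : 2 ≤ r := by omega
    have hm : 1 ≤ (r - 1).toNat := by omega
    have h1 := A_iff ns r hr2
    have h2 := B_iff ns r hr2
    have h3 := bridge ns (r - 1).toNat hm
    have : has_run_length ns r = true ↔ has_run_length_alt ns r = true := by
      rw [h1, h2, h3]
    cases hA : has_run_length ns r <;> cases hB : has_run_length_alt ns r <;>
      simp_all
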